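-- pv_equiv track=rewrite | github.com/SauravSinha76/scaler2 | class8/amezing_subarray.py | solve
-- ===== SOURCE A (Python) =====
-- def solve(A):
--     n = len(A)
--     A = A.upper()
--     vowal = "AEIOU"
--     count =0
--     ans =0
--     for i in range(n-1,-1,-1):
--         count += 1
--         if A[i] in vowal:
--             ans += count
--     return ans
-- ===== SOURCE B (Python) =====
-- def solve(A):
--     ans = 0
--     seen = 0
--     for ch in A.upper():
--         if ch in "AEIOU":
--             seen += 1
--         ans += seen
--     return ans
-- ===== Notes on version B (the rewrite author's own statement) =====
-- stated objective: alternative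
-- what changed: Replaces A's backward scan that adds the distance-from-end (count = n-i) at each vowel with a forward scan that maintains a running prefix vowel count and adds it at every position; the totals coincide because summing the prefix count over all positions equals summing n-i over vowel positions.
import Mathlib
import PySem

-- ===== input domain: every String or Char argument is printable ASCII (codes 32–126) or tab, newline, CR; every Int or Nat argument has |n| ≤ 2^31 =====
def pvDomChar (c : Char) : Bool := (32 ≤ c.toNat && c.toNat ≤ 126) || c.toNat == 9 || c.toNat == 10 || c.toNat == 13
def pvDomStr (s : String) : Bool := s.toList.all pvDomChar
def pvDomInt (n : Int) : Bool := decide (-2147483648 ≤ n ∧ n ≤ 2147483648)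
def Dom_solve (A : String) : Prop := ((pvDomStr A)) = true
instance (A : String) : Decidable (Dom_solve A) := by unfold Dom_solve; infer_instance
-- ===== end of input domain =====

-- B replaces A's backward scan (adding count = n-i at each vowel) with a forward scan adding a
-- running prefix vowel count at every position: a different maintained quantity, same exact total.

-- ===== PORT A =====
-- vowal = "AEIOU"  (shared literal; 'A[i] in vowal' on a 1-char string is char membership)
def pvVowels : List Char := "AEIOU".toList

-- literal port of A: count/ans accumulators over range(n-1,-1,-1); A[i] via pyGet?
-- (the index is always in range, so the 'none' branch of pyGet? is unreachable)
def solve (A : String) : Int :=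
  let n : Int := PySem.Str.len A
  let Au : List Char := PySem.Chars.upper A.toList
  let st : Int × Int :=
    (PySem.List.pyRange (n - 1) (-1) (-1)).foldl
      (fun (s : Int × Int) i =>
        let count := s.1 + 1
        let ans :=
          if (PySem.List.pyGet? Au i).any (fun c => decide (c ∈ pvVowels)) then s.2 + count
          else s.2
        (count, ans))
      (0, 0)
  st.2

-- ===== PORT B =====
def solve_alt (A : String) : Int :=
  let st : Int × Int :=
    (PySem.Chars.upper A.toList).foldl
      (fun (s : Int × Int) ch =>
        let seen := if ch ∈ pvVowels then s.1 + 1 else s.1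
        (seen, s.2 + seen))
      (0, 0)
  st.2

-- ===== PRECONDITION & SPEC =====
def Spec_solve (A : String) (out : Int) : Prop := out = solve_alt A
instance (A : String) (out : Int) : Decidable (Spec_solve A out) := by unfold Spec_solve; infer_instance

-- ===== CLAIM (what is proved, stated in full; the proofs are below) =====
def Claim_equal_solve : Prop := ∀ (A : String), Dom_solve A → Spec_solve A (solve A)

-- ===== LEMMAS AND PROOFS =====

-- A's loop body, as a function of the character at the visited index
def pvStepA (s : Int × Int) (c : Char) : Int × Int :=
  (s.1 + 1, if c ∈ pvVowels then s.2 + (s.1 + 1) else s.2)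

-- B's loop body
def pvStepB (s : Int × Int) (c : Char) : Int × Int :=
  (if c ∈ pvVowels then s.1 + 1 else s.1,
   s.2 + (if c ∈ pvVowels then s.1 + 1 else s.1))

-- range(n-1,-1,-1) enumerated
theorem pvRange_down (n : Nat) :
    PySem.List.pyRange ((n : Int) - 1) (-1) (-1)
      = (List.range n).map (fun k : Nat => (n : Int) - 1 - (k : Int)) := by
  cases n with
  | zero => simp [PySem.List.pyRange]
  | succ m =>
    simp only [PySem.List.pyRange]
    rw [if_neg (by norm_num), if_neg (by norm_num : ¬ ((0:Int) < -1)),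
        if_pos (by push_cast; omega : (-1:Int) < ((m+1 : Nat) : Int) - 1)]
    have h3 : (((((m+1:Nat)):Int) - 1 - -1 + - (-1) - 1) / - (-1)).toNat = m + 1 := by
      push_cast; omega
    rw [h3]
    apply List.map_congr_left
    intro k _
    push_cast
    ring

-- B's accumulator shift: running over L from (s, a) vs from (0, 0)
theorem pvShiftB (L : List Char) (s a : Int) :
    (L.foldl pvStepB (s, a)).2 = a + s * L.length + (L.foldl pvStepB (0, 0)).2 := by
  induction L generalizing s a with
  | nil => simp
  | cons c L ih =>
    by_cases h : c ∈ pvVowels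
    · simp only [List.foldl_cons, pvStepB, if_pos h]
      rw [ih (s + 1) (a + (s + 1)), ih (0 + 1) (0 + (0 + 1))]
      simp only [List.length_cons]
      push_cast
      ring
    · simp only [List.foldl_cons, pvStepB, if_neg h]
      rw [ih s (a + s), ih 0 (0 + 0)]
      simp only [List.length_cons]
      push_cast
      ring

-- core: A's foldr over L equals (|L|, B's answer)
theorem pvCore (L : List Char) :
    L.foldr (fun c s => pvStepA s c) ((0 : Int), (0 : Int))
      = ((L.length : Int), (L.foldl pvStepB (0, 0)).2) := by
  induction L with
  | nil => simp
  | cons c L ih =>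
    rw [List.foldr_cons, ih, List.foldl_cons]
    by_cases h : c ∈ pvVowels
    · simp only [pvStepA, pvStepB, if_pos h, Prod.mk.injEq]
      rw [pvShiftB L (0 + 1) (0 + (0 + 1))]
      refine ⟨?_, ?_⟩ <;> first | (simp only [List.length_cons]; push_cast; ring) | ring
    · simp only [pvStepA, pvStepB, if_neg h, Prod.mk.injEq]
      rw [pvShiftB L 0 (0 + 0)]
      refine ⟨?_, ?_⟩ <;> first | (simp only [List.length_cons]; push_cast; ring) | ring

-- the characters A visits, in order, are L.reverse
theorem pvIdxFold (L : List Char) (init : Int × Int) :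
    ((List.range L.length).map (fun k : Nat => (L.length : Int) - 1 - (k : Int))).foldl
        (fun (s : Int × Int) i =>
          (s.1 + 1,
           if (PySem.List.pyGet? L i).any (fun c => decide (c ∈ pvVowels)) then s.2 + (s.1 + 1)
           else s.2))
        init
      = L.reverse.foldl pvStepA init := by
  rw [List.foldl_map (f := fun k : Nat => (L.length : Int) - 1 - (k : Int))]
  have hmap : L.reverse = (List.range L.length).map (fun k => L.reverse.getD k 'A') := by
    apply List.ext_getElem
    · simp
    · intro i h1 h2
      simp only [List.getElem_map, List.getElem_range]
      exact (List.getD_eq_getElem _ _ h1).symm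
  conv_rhs => rw [hmap, List.foldl_map (f := fun k : Nat => L.reverse.getD k 'A')]
  apply PySem.List.foldl_congr_mem
  intro s k hk
  have hkn : k < L.length := List.mem_range.mp hk
  have hget : PySem.List.pyGet? L ((L.length : Int) - 1 - k) = some (L.reverse.getD k 'A') := by
    have hidx : L.length - 1 - k < L.length := by omega
    have hrev : L.reverse.getD k 'A' = L[L.length - 1 - k] := by
      rw [List.getD_eq_getElem _ _ (by simpa using hkn)]
      rw [List.getElem_reverse]
    rw [hrev]
    simp only [PySem.List.pyGet?, PySem.List.pyIdx?]
    rw [if_pos (by omega : (0:Int) ≤ (L.length : Int) - 1 - k),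
        if_pos (by omega : (L.length : Int) - 1 - k < (L.length : Int))]
    have ht : ((L.length : Int) - 1 - k).toNat = L.length - 1 - k := by omega
    rw [ht]
    simp [List.getElem?_eq_getElem hidx]
  rw [hget]
  by_cases hv : L.reverse.getD k 'A' ∈ pvVowels
  · simp only [Option.any_some, decide_eq_true_eq, if_pos hv, pvStepA]
  · simp only [Option.any_some, decide_eq_true_eq, pvStepA, if_neg hv]

-- ===== VERDICT (by name: the statement is the Claim_ definition above) =====
theorem solve_spec : Claim_equal_solve := by
  intro A _
  unfold Spec_solve solve solve_alt
  set L : List Char := PySem.Chars.upper A.toList with hL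
  have hlen : PySem.Str.len A = (L.length : Int) := by
    rw [PySem.Str.len_eq, hL]; simp [PySem.Chars.upper]
  simp only [hlen]
  rw [pvRange_down L.length, pvIdxFold L (0, 0), List.foldl_reverse, pvCore L]
  rfl
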